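-- pv_equiv track=rewrite | github.com/Krishn1101/Problems-on-Python | Majority_Element-More_Than_N_By_3.py | findMajority
-- ===== SOURCE A (Python) =====
-- def findMajority(arr):
--     num = set()
--
--     n = len(arr)
--
--     freq = {}
--     for i in arr:
--         if i not in freq:
--             freq[i] = 1
--         else:
--             freq[i] += 1
--
--     for key,value in freq.items():
--         if value>n//3:
--             num.add(key)
--
--     return sorted(list(num))
-- ===== SOURCE B (Python) =====
-- def findMajority(arr):
--     t = len(arr) // 3
--     s = sorted(arr)
--     res = []
--     i = 0
--     while i < len(s):
--         # advance j to the end of the run of s[i]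
--         j = i + 1
--         while j < len(s) and s[j] == s[i]:
--             j += 1
--         if j - i > t:
--             res.append(s[i])
--         i = j
--     return res
-- ===== Notes on version B (the rewrite author's own statement) =====
-- stated objective: alternative
-- what changed: Replaces A's hash-count (dict of frequencies, then a set of qualifying keys, then a final sort) by sort-then-scan: sort the array once and emit each run of equal values whose length exceeds n//3, so the output is produced already sorted and deduplicated with no dict, no set and no final sort.
import Mathlib
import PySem

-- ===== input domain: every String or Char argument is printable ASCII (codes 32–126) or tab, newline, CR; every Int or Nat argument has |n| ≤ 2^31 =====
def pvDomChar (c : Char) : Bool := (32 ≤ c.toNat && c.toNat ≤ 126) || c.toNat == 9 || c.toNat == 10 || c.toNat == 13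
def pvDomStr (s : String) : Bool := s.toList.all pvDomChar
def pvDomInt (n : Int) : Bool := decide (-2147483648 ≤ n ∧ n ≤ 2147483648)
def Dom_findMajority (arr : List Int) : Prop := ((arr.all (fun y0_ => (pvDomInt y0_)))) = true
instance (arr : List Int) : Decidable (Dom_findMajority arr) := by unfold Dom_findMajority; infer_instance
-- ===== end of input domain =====

-- B replaces A's dict-count + set-filter + final sort by sort-then-run-length-scan (alternative decomposition, same results).

-- ===== PORT A =====
def findMajority (arr : List Int) : List Int :=
  let num : PySem.Set Int := PySem.Set.empty
  let n : Int := (arr.length : Int)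
  let freq : PySem.Dict Int Int :=
    arr.foldl (fun d i =>
      if d.contains i = false then d.insert i 1 else d.modify i 0 (· + 1))
      PySem.Dict.empty
  let num := freq.items.foldl (fun s kv =>
      if kv.2 > PySem.Int.floordiv n 3 then PySem.Set.add s kv.1 else s) num
  PySem.List.sorted num (fun x => x) false

-- ===== PORT B =====
-- transliteration of Source B's run scan over the sorted list: each outer-loop
-- iteration consumes one run s[i..j) (recursive call = next iteration); the
-- inner while counting the run is List.takeWhile (· == v) on the tail, and
-- moving i to j is the matching dropWhile.
def scanRuns (t : Int) : List Int → List Int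
  | [] => []
  | v :: rest =>
    let k : Int := 1 + ((rest.takeWhile (· == v)).length : Int)
    let tail := scanRuns t (rest.dropWhile (· == v))
    if k > t then v :: tail else tail
termination_by s => s.length
decreasing_by
  have := List.length_dropWhile_le (· == v) rest
  simp; omega

def findMajority_alt (arr : List Int) : List Int :=
  scanRuns (PySem.Int.floordiv (arr.length : Int) 3)
    (PySem.List.sorted arr (fun x => x) false)

-- ===== PRECONDITION & SPEC =====
def Spec_findMajority (arr : List Int) (out : List Int) : Prop := out = findMajority_alt arr
instance (arr : List Int) (out : List Int) : Decidable (Spec_findMajority arr out) := by unfold Spec_findMajority; infer_instance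

-- ===== CLAIM (what is proved, stated in full; the proofs are below) =====
def Claim_equal_findMajority : Prop := ∀ (arr : List Int), Dom_findMajority arr → Spec_findMajority arr (findMajority arr)

-- ===== LEMMAS AND PROOFS =====

-- A's counting loop is collections.Counter: its step function equals counter's step.
theorem freq_eq_counter (arr : List Int) :
    arr.foldl (fun d i =>
      if d.contains i = false then d.insert i 1 else d.modify i 0 (· + 1))
      PySem.Dict.empty = PySem.Dict.counter arr := by
  rw [PySem.Dict.counter_eq_foldl]
  congr 1
  funext d i
  by_cases h : d.contains i = false
  · simp [h, PySem.Dict.modify, PySem.Dict.getD_of_not_contains (h := h)]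
  · simp [h]

-- A's set-building loop over distinct keys is a filter.
theorem fold_add_filter (t : Int) (f : Int → Int) (ks s : List Int)
    (h : (s ++ ks).Nodup) :
    (ks.map (fun k => (k, f k))).foldl
        (fun s kv => if kv.2 > t then PySem.Set.add s kv.1 else s) s
      = s ++ ks.filter (fun k => decide (t < f k)) := by
  induction ks generalizing s with
  | nil => simp
  | cons k ks ih =>
    have hk : k ∉ s := by
      intro hks
      exact ((List.nodup_append.mp h).2.2 k hks k List.mem_cons_self) rfl
    have hstep : (if f k > t then PySem.Set.add s k else s)
        = s ++ (if decide (t < f k) then [k] else []) := by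
      by_cases hc : t < f k
      · simp [hc, gt_iff_lt, PySem.Set.add, PySem.Set.contains,
          List.contains_eq_mem, hk]
      · simp [hc, gt_iff_lt]
    simp only [List.map_cons, List.foldl_cons, hstep]
    rw [ih (s ++ (if decide (t < f k) then [k] else []))]
    · by_cases hc : t < f k <;>
        simp [hc, List.append_assoc]
    · by_cases hc : t < f k
      · simpa [hc, List.append_assoc] using h
      · simpa [hc] using
          List.Nodup.sublist ((List.sublist_cons_self k ks).append_left s) h

-- Characterisation of B's run scan on a (≤)-sorted list:
-- its members are exactly the values with count > t, and it is strictly increasing.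
theorem scanRuns_step (t v : Int) (rest : List Int)
    (hs : (v :: rest).Pairwise (· ≤ ·))
    (ih : (rest.dropWhile (· == v)).Pairwise (· ≤ ·) →
      (∀ x, x ∈ scanRuns t (rest.dropWhile (· == v)) ↔
          x ∈ rest.dropWhile (· == v) ∧ t < ((rest.dropWhile (· == v)).count x : Int))
        ∧ (scanRuns t (rest.dropWhile (· == v))).Pairwise (· < ·)) :
    (∀ x, x ∈ scanRuns t (v :: rest) ↔ x ∈ v :: rest ∧ t < ((v :: rest).count x : Int))
      ∧ (scanRuns t (v :: rest)).Pairwise (· < ·) := by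
  have hrest : rest.Pairwise (· ≤ ·) := (List.pairwise_cons.mp hs).2
  have hv : ∀ x ∈ rest, v ≤ x := (List.pairwise_cons.mp hs).1
  have hd : (rest.dropWhile (· == v)).Pairwise (· ≤ ·) :=
    hrest.sublist (List.dropWhile_sublist _)
  have hdsub : ∀ x ∈ rest.dropWhile (· == v), x ∈ rest :=
    fun x hx => (List.dropWhile_sublist _).mem hx
  -- every element of the dropWhile part is strictly greater than v
  have hdgt : ∀ x ∈ rest.dropWhile (· == v), v < x := by
    intro x hx
    rcases hdw : rest.dropWhile (· == v) with _ | ⟨y, ys⟩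
    · simp [hdw] at hx
    · have hy : ¬ (y == v) = true := by
        have := List.head?_dropWhile_not (· == v) rest
        rw [hdw] at this; simpa using this
      have hyne : y ≠ v := by simpa using hy
      have hyv : v < y := lt_of_le_of_ne (hv y (hdsub y (hdw ▸ List.mem_cons_self))) (Ne.symm hyne)
      rw [hdw] at hx
      rcases List.mem_cons.mp hx with rfl | hx'
      · exact hyv
      · have : y ≤ x := by
          rw [hdw] at hd
          exact (List.pairwise_cons.mp hd).1 x hx'
        omega
  have htk : ∀ x ∈ rest.takeWhile (· == v), x = v := by
    intro x hx
    have := List.mem_takeWhile_imp hx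
    simpa using this
  have hsplit : rest = rest.takeWhile (· == v) ++ rest.dropWhile (· == v) :=
    (List.takeWhile_append_dropWhile).symm
  -- counts
  have hcnt_take : ∀ x, (rest.takeWhile (· == v)).count x =
      if x = v then (rest.takeWhile (· == v)).length else 0 := by
    intro x
    by_cases hxv : x = v
    · subst hxv
      rw [if_pos rfl, List.count_eq_length]
      intro y hy; rw [htk y hy]
    · rw [if_neg hxv, List.count_eq_zero]
      intro hmem; exact hxv (htk x hmem)
  have hcnt_drop : (rest.dropWhile (· == v)).count v = 0 := by
    rw [List.count_eq_zero]
    intro hmem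
    exact absurd rfl (ne_of_gt (hdgt v hmem))
  have hcv : (v :: rest).count v = (rest.takeWhile (· == v)).length + 1 := by
    rw [List.count_cons_self]
    conv_lhs => rw [hsplit]
    rw [List.count_append, hcnt_take, hcnt_drop, if_pos rfl]
  have hcx : ∀ x, x ≠ v → (v :: rest).count x = (rest.dropWhile (· == v)).count x := by
    intro x hx
    have h1 : (v :: rest).count x = rest.count x := by
      simp [Ne.symm hx]
    rw [h1]
    conv_lhs => rw [hsplit]
    rw [List.count_append, hcnt_take, if_neg hx]
    simp
  obtain ⟨ihm, ihp⟩ := ih hd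
  have hsub : ∀ x ∈ scanRuns t (rest.dropWhile (· == v)), v < x := by
    intro x hx; exact hdgt x ((ihm x).mp hx).1
  constructor
  · intro x
    rw [scanRuns]
    by_cases hxv : x = v
    · subst hxv
      have hnotin : x ∉ scanRuns t (rest.dropWhile (· == x)) := by
        intro hmem; exact absurd rfl (ne_of_gt (hsub x hmem))
      by_cases hc : 1 + ((rest.takeWhile (· == x)).length : Int) > t <;>
        simp only [hc, if_pos, if_neg, not_false_iff] <;>
        simp [hnotin, hcv] <;> omega
    · have hxr : x ∈ v :: rest ↔ x ∈ rest.dropWhile (· == v) := by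
        constructor
        · intro hmem
          rcases List.mem_cons.mp hmem with rfl | hmem'
          · exact absurd rfl hxv
          · rw [hsplit] at hmem'
            rcases List.mem_append.mp hmem' with h1 | h2
            · exact absurd (htk x h1) hxv
            · exact h2
        · intro hmem
          exact List.mem_cons_of_mem v (hdsub x hmem)
      by_cases hc : 1 + ((rest.takeWhile (· == v)).length : Int) > t <;>
        simp only [hc, if_pos, if_neg, not_false_iff] <;>
        rw [hcx x hxv] <;>
        simp [List.mem_cons, hxv, ihm x, ← hxr]
  · rw [scanRuns]
    split
    · exact List.pairwise_cons.mpr ⟨hsub, ihp⟩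
    · exact ihp

-- Characterisation of B's run scan on a (≤)-sorted list:
-- its members are exactly the values with count > t, and it is strictly increasing.
theorem scanRuns_spec (t : Int) (s : List Int) (hs : s.Pairwise (· ≤ ·)) :
    (∀ x, x ∈ scanRuns t s ↔ x ∈ s ∧ t < (s.count x : Int))
      ∧ (scanRuns t s).Pairwise (· < ·) := by
  induction s using scanRuns.induct t with
  | case1 => simp [scanRuns]
  | case2 v rest k hc ih => exact scanRuns_step t v rest hs ih
  | case3 v rest k hc ih => exact scanRuns_step t v rest hs ih

-- ===== VERDICT (by name: the statement is the Claim_ definition above) =====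
theorem findMajority_spec : Claim_equal_findMajority := by
  intro arr _
  unfold Spec_findMajority findMajority findMajority_alt
  simp only [freq_eq_counter, PySem.Dict.items_counter]
  set t : Int := PySem.Int.floordiv (arr.length : Int) 3 with ht
  have hnodup0 : (([] : List Int) ++ PySem.Set.ofList arr).Nodup := by
    simp only [List.nil_append]
    exact PySem.Set.nodup_ofList arr
  rw [fold_add_filter t (fun k => ((arr.count k : Int))) (PySem.Set.ofList arr) PySem.Set.empty hnodup0]
  simp only [PySem.Set.empty, List.nil_append]
  set s := PySem.List.sorted arr (fun x => x) false with hsdef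
  have hperm : s.Perm arr := PySem.List.sorted_perm arr (fun x => x) false
  have hs : s.Pairwise (· ≤ ·) := by
    have := PySem.List.sorted_pairwise arr (fun x => x)
    simpa using this
  obtain ⟨hmem, hpw⟩ := scanRuns_spec t s hs
  apply PySem.List.sorted_eq_of_perm_of_pairwise_lt
  · rw [List.perm_ext_iff_of_nodup hpw.nodup
      ((PySem.Set.nodup_ofList arr).filter _)]
    intro x
    rw [hmem x, List.mem_filter, PySem.Set.mem_ofList]
    rw [hperm.mem_iff, hperm.count_eq]
    simp
  · simpa using hpw
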